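-- pv_equiv track=rewrite | github.com/GRitger/school | test_variant/16.12.2024/27_B.py | fu
-- ===== SOURCE A (Python) =====
-- def fu(cl):
--     ans = [0,0]
--     rast = 10000000000000000000000000000000000000000000000000000000000000000000000000000
--     for i in cl:
--         x, y = i
--         s = 0
--         for j in cl:
--             x2, y2 = j
--             s += abs(x-x2) + abs(y-y2)
--         if s < rast:
--             rast = s
--             ans = i
--     return ans
-- ===== SOURCE B (Python) =====
-- # B: O(n log n) — per-point distance sums via sorted coordinates, prefix sums and a
-- # first-occurrence rank table, instead of A's O(n^2) nested loop. The min-scan with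
-- # its initial value 10**76 is kept from A because it is observable behaviour
-- # (it is what A returns for an empty list).
--
-- def _prefix(vals):
--     t = 0
--     pref = [0]
--     for v in vals:
--         t += v
--         pref.append(t)
--     return t, pref
--
--
-- def _first_pos(vals):
--     pos = {}
--     for i, v in enumerate(vals):
--         if v not in pos:
--             pos[v] = i
--     return pos
--
--
-- def _dim_cost(v, k, pref, total, n):
--     return v * k - pref[k] + (total - pref[k] - v * (n - k))
--
--
-- def fu(cl):
--     n = len(cl)
--     xs = sorted(p[0] for p in cl)
--     ys = sorted(p[1] for p in cl)
--     tx, px = _prefix(xs)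
--     ty, py = _prefix(ys)
--     posx = _first_pos(xs)
--     posy = _first_pos(ys)
--     ans = [0, 0]
--     rast = 10000000000000000000000000000000000000000000000000000000000000000000000000000
--     for p in cl:
--         s = _dim_cost(p[0], posx[p[0]], px, tx, n) + _dim_cost(p[1], posy[p[1]], py, ty, n)
--         if s < rast:
--             rast = s
--             ans = p
--     return ans
-- ===== Notes on version B (the rewrite author's own statement) =====
-- stated objective: faster
-- what changed: Replaces A's O(n^2) nested loop (re-summing all pairwise Manhattan distances for every point) by sorting the x- and y-coordinates once, building prefix sums and a first-occurrence rank table, so each point's total distance is computed in O(1) from the prefix sums; the min-scan and its initial value are kept since they are observable (empty list).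
import Mathlib
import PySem

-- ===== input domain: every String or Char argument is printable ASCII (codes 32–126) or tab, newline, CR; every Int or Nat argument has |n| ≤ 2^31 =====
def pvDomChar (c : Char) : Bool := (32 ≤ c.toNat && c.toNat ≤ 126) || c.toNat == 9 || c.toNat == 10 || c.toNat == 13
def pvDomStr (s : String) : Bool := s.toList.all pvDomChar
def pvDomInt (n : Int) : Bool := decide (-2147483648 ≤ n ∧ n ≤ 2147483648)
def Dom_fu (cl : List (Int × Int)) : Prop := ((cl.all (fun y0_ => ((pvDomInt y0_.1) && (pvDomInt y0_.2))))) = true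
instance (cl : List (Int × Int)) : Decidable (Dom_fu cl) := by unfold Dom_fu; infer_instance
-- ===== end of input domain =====

-- B computes each point's total Manhattan distance from sorted coordinates + prefix sums
-- instead of A's inner loop over all points; same min-scan, same result.

-- ===== PORT A =====
def fu (cl : List (Int × Int)) : List Int :=
  (cl.foldl (fun (st : List Int × Int) i =>
      let s := cl.foldl (fun s j => s + (|i.1 - j.1| + |i.2 - j.2|)) 0
      if s < st.2 then ([i.1, i.2], s) else st)
    ([0, 0], 10000000000000000000000000000000000000000000000000000000000000000000000000000)).1

-- ===== PORT B =====
-- _prefix(vals): running total and the prefix-sum list [0, v0, v0+v1, …]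
def pvPrefix (vals : List Int) : Int × List Int :=
  vals.foldl (fun a v => (a.1 + v, a.2 ++ [a.1 + v])) (0, [0])

-- _first_pos(vals): dict value ↦ first index (built with 'if v not in pos')
def pvFirstPos (vals : List Int) : PySem.Dict Int Int :=
  (PySem.List.enumerate vals 0).foldl
    (fun d iv => if d.contains iv.2 then d else d.insert iv.2 iv.1) PySem.Dict.empty

-- _dim_cost(v, k, pref, total, n)
def pvDimCost (v k : Int) (pref : List Int) (total n : Int) : Int :=
  v * k - PySem.List.pyGetD pref k 0 + (total - PySem.List.pyGetD pref k 0 - v * (n - k))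

def fu_alt (cl : List (Int × Int)) : List Int :=
  let n : Int := cl.length
  let xs := PySem.List.sorted (cl.map (fun p => p.1)) (fun v => v) false
  let ys := PySem.List.sorted (cl.map (fun p => p.2)) (fun v => v) false
  let txpx := pvPrefix xs
  let typy := pvPrefix ys
  let posx := pvFirstPos xs
  let posy := pvFirstPos ys
  -- posx[p[0]] / posy[p[1]]: the key is always present (p.1 ∈ xs, p.2 ∈ ys), so '.getD 0' is exact
  (cl.foldl (fun (st : List Int × Int) p =>
      let s := pvDimCost p.1 ((posx.get? p.1).getD 0) txpx.2 txpx.1 n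
             + pvDimCost p.2 ((posy.get? p.2).getD 0) typy.2 typy.1 n
      if s < st.2 then ([p.1, p.2], s) else st)
    ([0, 0], 10000000000000000000000000000000000000000000000000000000000000000000000000000)).1

-- ===== PRECONDITION & SPEC =====
def Spec_fu (cl : List (Int × Int)) (out : List Int) : Prop := out = fu_alt cl
instance (cl : List (Int × Int)) (out : List Int) : Decidable (Spec_fu cl out) := by unfold Spec_fu; infer_instance

-- ===== CLAIM (what is proved, stated in full; the proofs are below) =====
def Claim_equal_fu : Prop := ∀ (cl : List (Int × Int)), Dom_fu cl → Spec_fu cl (fu cl)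

-- ===== LEMMAS AND PROOFS =====

-- running totals of the prefix-sum loop
def pvRT (t : Int) : List Int → List Int
  | [] => []
  | v :: vs => (t + v) :: pvRT (t + v) vs

theorem pvPrefix_foldl (vals : List Int) (t : Int) (l : List Int) :
    vals.foldl (fun a v => (a.1 + v, a.2 ++ [a.1 + v])) ((t, l) : Int × List Int)
      = (t + vals.sum, l ++ pvRT t vals) := by
  induction vals generalizing t l with
  | nil => simp [pvRT]
  | cons v vs ih =>
      simp only [List.foldl_cons, pvRT, ih, List.sum_cons, List.append_assoc,
        List.singleton_append, Prod.mk.injEq]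
      exact ⟨by ring, trivial⟩

theorem pvRT_getD (vals : List Int) (t : Int) (j : Nat) (hj : j < vals.length) :
    (pvRT t vals).getD j 0 = t + (vals.take (j + 1)).sum := by
  induction vals generalizing t j with
  | nil => simp at hj
  | cons v vs ih =>
      cases j with
      | zero => simp [pvRT]
      | succ j =>
          simp only [pvRT, List.getD_cons_succ, List.take_succ_cons, List.sum_cons]
          rw [ih (t + v) j (by simpa using hj)]
          ring

theorem pvPrefix_fst (vals : List Int) : (pvPrefix vals).1 = vals.sum := by
  unfold pvPrefix; rw [pvPrefix_foldl]; simp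

theorem pvPrefix_getD (vals : List Int) (k : Nat) (hk : k ≤ vals.length) :
    (pvPrefix vals).2.getD k 0 = (vals.take k).sum := by
  unfold pvPrefix
  rw [pvPrefix_foldl]
  cases k with
  | zero => simp
  | succ j =>
      have hj : j < vals.length := by omega
      simp only [List.singleton_append, List.getD_cons_succ]
      rw [pvRT_getD vals 0 j hj]
      simp

theorem pvFirstPos_fold (vals : List Int) (i0 : Int) (d : PySem.Dict Int Int) (v : Int) :
    ((PySem.List.enumerate vals i0).foldl
        (fun d iv => if d.contains iv.2 then d else d.insert iv.2 iv.1) d).get? v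
      = if d.contains v then d.get? v
        else if v ∈ vals then some (i0 + (vals.idxOf v : Int)) else none := by
  induction vals generalizing i0 d with
  | nil =>
      simp only [PySem.List.enumerate_nil, List.foldl_nil, List.not_mem_nil, if_false]
      by_cases h : d.contains v
      · simp [h]
      · rw [if_neg h, (PySem.Dict.get?_eq_none_iff_contains d v).2 (by simpa using h)]
  | cons a vs ih =>
      rw [PySem.List.enumerate_cons, List.foldl_cons]
      dsimp only
      by_cases ha : d.contains a
      · rw [if_pos ha, ih]
        by_cases hv : v = a
        · subst hv
          simp [ha]
        · by_cases hc : d.contains v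
          · simp [hc]
          · rw [if_neg hc, if_neg hc]
            by_cases hm : v ∈ vs
            · rw [if_pos hm, if_pos (by simp [hm])]
              rw [List.idxOf_cons_ne vs (fun h => hv h.symm)]
              push_cast
              ring_nf
            · rw [if_neg hm, if_neg (by simp [hv, hm])]
      · rw [if_neg ha, ih]
        by_cases hv : v = a
        · subst hv
          rw [if_pos (PySem.Dict.contains_insert_self d v i0),
              if_pos (List.mem_cons_self), PySem.Dict.get?_insert_self,
              List.idxOf_cons_self, if_neg ha]
          simp
        · have hci : (d.insert a i0).contains v = d.contains v := by
            rw [PySem.Dict.contains_insert]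
            simp [hv]
          rw [hci]
          by_cases hc : d.contains v
          · rw [if_pos hc, if_pos hc, PySem.Dict.get?_insert, if_neg hv]
          · rw [if_neg hc, if_neg hc]
            by_cases hm : v ∈ vs
            · rw [if_pos hm, if_pos (by simp [hm])]
              rw [List.idxOf_cons_ne vs (fun h => hv h.symm)]
              push_cast
              ring_nf
            · rw [if_neg hm, if_neg (by simp [hv, hm])]

theorem pvFirstPos_get (vals : List Int) (v : Int) (hv : v ∈ vals) :
    ((pvFirstPos vals).get? v).getD 0 = (vals.idxOf v : Int) := by
  unfold pvFirstPos
  rw [pvFirstPos_fold]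
  simp [hv, PySem.Dict.contains_empty]

theorem pv_idxOf_eq_countP (s : List Int) (hs : s.Pairwise (· ≤ ·)) (v : Int) (hv : v ∈ s) :
    s.idxOf v = s.countP (fun w => decide (w < v)) := by
  induction s with
  | nil => simp at hv
  | cons a t ih =>
      rcases List.pairwise_cons.1 hs with ⟨hle, ht⟩
      by_cases hva : v = a
      · subst hva
        rw [List.idxOf_cons_self, List.countP_cons_of_neg (by simp),
            List.countP_eq_zero.2 (by
              intro b hb
              simpa using not_lt.2 (hle b hb))]
      · have hvt : v ∈ t := by
          rcases List.mem_cons.1 hv with h | h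
          · exact absurd h hva
          · exact h
        have hav : a < v := lt_of_le_of_ne (hle v hvt) (fun h => hva h.symm)
        rw [List.idxOf_cons_ne t (fun h => hva h.symm),
            List.countP_cons_of_pos (by simpa using hav), ih ht hvt]

theorem pv_sorted_split (s : List Int) (hs : s.Pairwise (· ≤ ·)) (v : Int) :
    (∀ w ∈ s.take (s.countP (fun w => decide (w < v))), w < v) ∧
    (∀ w ∈ s.drop (s.countP (fun w => decide (w < v))), v ≤ w) := by
  induction s with
  | nil => simp
  | cons a t ih =>
      rcases List.pairwise_cons.1 hs with ⟨hle, ht⟩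
      by_cases hav : a < v
      · rw [List.countP_cons_of_pos (by simpa using hav)]
        rcases ih ht with ⟨h1, h2⟩
        refine ⟨?_, ?_⟩
        · intro w hw
          rw [List.take_succ_cons] at hw
          rcases List.mem_cons.1 hw with h | h
          · exact h ▸ hav
          · exact h1 w h
        · intro w hw
          rw [List.drop_succ_cons] at hw
          exact h2 w hw
      · rw [List.countP_eq_zero.2 (by
          intro b hb
          rcases List.mem_cons.1 hb with h | h
          · subst h; simpa using hav
          · simpa using not_lt.2 (le_trans (not_lt.1 hav) (hle b h)))]
        refine ⟨by simp, ?_⟩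
        intro w hw
        rw [List.drop_zero] at hw
        rcases List.mem_cons.1 hw with h | h
        · exact h ▸ not_lt.1 hav
        · exact le_trans (not_lt.1 hav) (hle w h)

theorem pv_sum_map_sub_left (v : Int) (l : List Int) :
    (l.map (fun w => v - w)).sum = v * l.length - l.sum := by
  induction l with
  | nil => simp
  | cons a t ih =>
      simp only [List.map_cons, List.sum_cons, List.length_cons, ih]
      push_cast
      ring

theorem pv_sum_map_sub_right (v : Int) (l : List Int) :
    (l.map (fun w => w - v)).sum = l.sum - v * l.length := by
  induction l with
  | nil => simp
  | cons a t ih =>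
      simp only [List.map_cons, List.sum_cons, List.length_cons, ih]
      push_cast
      ring

theorem pv_absSum (s : List Int) (hs : s.Pairwise (· ≤ ·)) (v : Int) :
    (s.map (fun w => |v - w|)).sum
      = v * ((s.countP (fun w => decide (w < v)) : Nat) : Int)
          - (s.take (s.countP (fun w => decide (w < v)))).sum
        + (s.sum - (s.take (s.countP (fun w => decide (w < v)))).sum
            - v * ((s.length : Int) - ((s.countP (fun w => decide (w < v)) : Nat) : Int))) := by
  set k := s.countP (fun w => decide (w < v)) with hkdef
  have hk : k ≤ s.length := List.countP_le_length
  rcases pv_sorted_split s hs v with ⟨hlt, hge⟩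
  have hsplit : s = s.take k ++ s.drop k := (List.take_append_drop k s).symm
  have hsum : s.sum = (s.take k).sum + (s.drop k).sum := by
    conv_lhs => rw [hsplit]
    rw [List.sum_append]
  have hmap : (s.map (fun w => |v - w|)).sum
      = ((s.take k).map (fun w => |v - w|)).sum + ((s.drop k).map (fun w => |v - w|)).sum := by
    conv_lhs => rw [hsplit]
    rw [List.map_append, List.sum_append]
  have htake : ((s.take k).map (fun w => |v - w|)).sum = v * k - (s.take k).sum := by
    rw [List.map_congr_left (fun w hw => abs_of_nonneg (by
          have := hlt w hw; omega)),
        pv_sum_map_sub_left]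
    rw [List.length_take_of_le hk]
  have hdrop : ((s.drop k).map (fun w => |v - w|)).sum
      = (s.drop k).sum - v * ((s.length : Int) - k) := by
    rw [List.map_congr_left (fun w hw => by
          have := hge w hw
          rw [abs_sub_comm, abs_of_nonneg (by omega)]),
        pv_sum_map_sub_right]
    have : ((s.drop k).length : Int) = (s.length : Int) - k := by
      rw [List.length_drop]; omega
    rw [this]
  rw [hmap, htake, hdrop]
  omega

theorem pv_sum_map_add {α : Type} (l : List α) (f g : α → Int) :
    (l.map (fun x => f x + g x)).sum = (l.map f).sum + (l.map g).sum := by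
  induction l with
  | nil => simp
  | cons a t ih =>
      simp only [List.map_cons, List.sum_cons, ih]
      ring

theorem pv_dim (vals : List Int) (v : Int) (hv : v ∈ vals) :
    pvDimCost v (((pvFirstPos (PySem.List.sorted vals (fun w => w) false)).get? v).getD 0)
        (pvPrefix (PySem.List.sorted vals (fun w => w) false)).2
        (pvPrefix (PySem.List.sorted vals (fun w => w) false)).1
        (vals.length)
      = (vals.map (fun w => |v - w|)).sum := by
  set s := PySem.List.sorted vals (fun w => w) false with hsdef
  have hp : s.Perm vals := PySem.List.sorted_perm ..
  have hs : s.Pairwise (· ≤ ·) := PySem.List.sorted_pairwise ..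
  have hvs : v ∈ s := (PySem.List.mem_sorted ..).2 hv
  rw [pvFirstPos_get s v hvs, pv_idxOf_eq_countP s hs v hvs]
  unfold pvDimCost
  rw [PySem.List.pyGetD_natCast,
      pvPrefix_getD s _ List.countP_le_length, pvPrefix_fst]
  have hlen : vals.length = s.length := (hp.length_eq).symm
  have hsum : (vals.map (fun w => |v - w|)).sum = (s.map (fun w => |v - w|)).sum :=
    ((hp.map (fun w => |v - w|)).sum_eq).symm
  rw [hsum, hlen, pv_absSum s hs v]

theorem pv_point_sum (cl : List (Int × Int)) (p : Int × Int) (hp : p ∈ cl) :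
    cl.foldl (fun s j => s + (|p.1 - j.1| + |p.2 - j.2|)) 0
      = pvDimCost p.1
          (((pvFirstPos (PySem.List.sorted (cl.map (fun q => q.1)) (fun v => v) false)).get? p.1).getD 0)
          (pvPrefix (PySem.List.sorted (cl.map (fun q => q.1)) (fun v => v) false)).2
          (pvPrefix (PySem.List.sorted (cl.map (fun q => q.1)) (fun v => v) false)).1
          (cl.length)
        + pvDimCost p.2
          (((pvFirstPos (PySem.List.sorted (cl.map (fun q => q.2)) (fun v => v) false)).get? p.2).getD 0)
          (pvPrefix (PySem.List.sorted (cl.map (fun q => q.2)) (fun v => v) false)).2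
          (pvPrefix (PySem.List.sorted (cl.map (fun q => q.2)) (fun v => v) false)).1
          (cl.length) := by
  rw [PySem.List.foldl_add]
  rw [pv_sum_map_add cl (fun j => |p.1 - j.1|) (fun j => |p.2 - j.2|)]
  have h1 : p.1 ∈ cl.map (fun q => q.1) := List.mem_map.2 ⟨p, hp, rfl⟩
  have h2 : p.2 ∈ cl.map (fun q => q.2) := List.mem_map.2 ⟨p, hp, rfl⟩
  have e1 := pv_dim (cl.map (fun q => q.1)) p.1 h1
  have e2 := pv_dim (cl.map (fun q => q.2)) p.2 h2
  rw [List.length_map] at e1 e2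
  rw [e1, e2, List.map_map, List.map_map]
  simp only [Function.comp_def]
  ring

theorem pv_fu_eq (cl : List (Int × Int)) : fu cl = fu_alt cl := by
  unfold fu fu_alt
  refine congrArg Prod.fst ?_
  apply PySem.List.foldl_congr_mem
  intro acc p hp
  dsimp only
  rw [pv_point_sum cl p hp]

-- ===== VERDICT (by name: the statement is the Claim_ definition above) =====
theorem fu_spec : Claim_equal_fu := by
  intro cl _
  unfold Spec_fu
  exact pv_fu_eq cl
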